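-- pv_equiv track=rewrite | github.com/Logic-1729/CS2205-Lexer | tests/verify_dot.py | expand_label
-- ===== SOURCE A (Python) =====
-- LABEL_SEPARATOR = ","
--
-- def expand_single_label(token: str):
--     """
--     解析单个标签片段（如 "[a-z]" 或 "x"），返回对应的字符集合。
--     支持：
--       - 字符范围：[a-z], [A-Z], [0-9]
--       - 字面量：单个字符或字符串（如 "ab" 视为 {'a', 'b'}）
--     """
--     chars = set()
--     token = token.strip()
--     if token.startswith("[") and token.endswith("]"):
--         # 处理范围形式，比如 [a-z]
--         content = token[1:-1]
--         i = 0
--         while i < len(content):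
--             if i + 2 < len(content) and content[i + 1] == "-":
--                 start, end = content[i], content[i + 2]
--                 chars.update(chr(c) for c in range(ord(start), ord(end) + 1))
--                 i += 3
--             else:
--                 chars.add(content[i])
--                 i += 1
--     else:
--         # 处理非范围形式，逐个字符添加
--         for c in token:
--             chars.add(c)
--     return chars
--
-- def expand_label(label: str):
--     """
--     解析完整的边标签（可能包含逗号分隔的多部分），例如 '[0-9],[a-y],z',
--     返回所有可能字符的并集。
--     """
--     chars = set()
--     label = str(label).strip('"')  # 去除 Graphviz 自动加的双引号
--     parts = [
--         p.strip() for p in label.split(LABEL_SEPARATOR) if p.strip()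
--     ]  # 将逗号分隔的各部分写入列表，下一步用 expand_single_label 处理
--     for part in parts:
--         chars.update(expand_single_label(part))
--     return chars
-- ===== SOURCE B (Python) =====
-- LABEL_SEPARATOR = ","
--
-- def _scan(content):
--     # consume the content as a stack (reversed, popping from the end = left to right)
--     out = []
--     buf = list(content)
--     buf.reverse()
--     while buf:
--         if len(buf) >= 3 and buf[-2] == "-":
--             a = buf.pop()
--             buf.pop()
--             b = buf.pop()
--             out.extend(chr(k) for k in range(ord(a), ord(b) + 1))
--         else:
--             out.append(buf.pop())
--     return out
--
-- def _part_chars(part):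
--     if part.startswith("[") and part.endswith("]"):
--         return _scan(part[1:-1])
--     return list(part)
--
-- def expand_label(label):
--     label = str(label).strip('"')
--     parts = [q for q in (p.strip() for p in label.split(LABEL_SEPARATOR)) if q]
--     return {c for part in parts for c in _part_chars(part)}
-- ===== Notes on version B (the rewrite author's own statement) =====
-- stated objective: alternative
-- what changed: Replaces A's index-based while-loop with incremental set insertion per token by a stack consumer (reversed buffer popped from the end) that produces the full character list, with one set comprehension deduplicating everything at the end.
import Mathlib
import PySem

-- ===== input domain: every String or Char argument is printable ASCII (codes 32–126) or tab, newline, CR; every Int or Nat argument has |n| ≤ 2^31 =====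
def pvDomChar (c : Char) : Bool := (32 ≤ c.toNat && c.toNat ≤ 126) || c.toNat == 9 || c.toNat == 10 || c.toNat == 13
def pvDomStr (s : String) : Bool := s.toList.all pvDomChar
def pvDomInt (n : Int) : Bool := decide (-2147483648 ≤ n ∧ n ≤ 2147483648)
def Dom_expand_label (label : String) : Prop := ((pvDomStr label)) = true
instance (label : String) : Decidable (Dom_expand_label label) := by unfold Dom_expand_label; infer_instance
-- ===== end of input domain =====

-- B replaces A's index-driven while-scan and incremental set mutation by a stack consumer
-- producing the character list, deduplicated once at the end (objective: alternative).


-- ===== PORT A =====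
-- str of a single character (chr(c) / content[i] as a 1-char Python string)
def pvMk1 (c : Char) : String := String.ofList [c]

-- the manual while-loop over index i in expand_single_label
def pvScanA (content : List Char) (i : Nat) (chars : PySem.Set String) : PySem.Set String :=
  if _h : i < content.length then
    if decide (i + 2 < content.length) && (content.getD (i + 1) ' ' == '-') then
      pvScanA content (i + 3)
        (PySem.Set.update chars
          ((PySem.List.pyRange ((content.getD i ' ').toNat : Int)
              (((content.getD (i + 2) ' ').toNat : Int) + 1) 1).map
            (fun k => pvMk1 (Char.ofNat k.toNat))))
    else
      pvScanA content (i + 1) (PySem.Set.add chars (pvMk1 (content.getD i ' ')))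
  else chars
termination_by content.length - i

-- expand_single_label (Python strings handled as List Char)
def pvExpandSingle (token : List Char) : PySem.Set String :=
  let tok := PySem.Chars.strip token
  if PySem.Chars.startswith tok ['['] && PySem.Chars.endswith tok [']'] then
    pvScanA (PySem.List.slice tok (some 1) (some (-1))) 0 PySem.Set.empty
  else
    tok.foldl (fun s c => PySem.Set.add s (pvMk1 c)) PySem.Set.empty

def expand_label (label : String) : List String :=
  let l := PySem.Chars.stripChars label.toList ['"']
  let parts := ((PySem.Chars.splitOn l [',']).filter
      (fun p => decide (PySem.Chars.strip p ≠ []))).map PySem.Chars.strip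
  parts.foldl (fun chars part => PySem.Set.update chars (pvExpandSingle part)) PySem.Set.empty

-- ===== PORT B =====
-- Source B's _scan: the reversed buffer popped from the end is the remaining content
-- consumed from the front — exact, pop() order equals left-to-right order.
def pvScanB (buf : List Char) (out : List Char) : List Char :=
  match buf with
  | a :: d :: b :: rest =>
      if d == '-' then
        pvScanB rest (out ++ (PySem.List.pyRange ((a.toNat : Int)) ((b.toNat : Int) + 1) 1).map
          (fun k => Char.ofNat k.toNat))
      else pvScanB (d :: b :: rest) (out ++ [a])
  | a :: rest => pvScanB rest (out ++ [a])
  | [] => out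

-- Source B's _part_chars
def pvPartChars (part : List Char) : List Char :=
  if PySem.Chars.startswith part ['['] && PySem.Chars.endswith part [']'] then
    pvScanB (PySem.List.slice part (some 1) (some (-1))) []
  else part

def expand_label_alt (label : String) : List String :=
  let l := PySem.Chars.stripChars label.toList ['"']
  let parts := ((PySem.Chars.splitOn l [',']).map PySem.Chars.strip).filter
      (fun p => decide (p ≠ []))
  PySem.Set.ofList ((parts.flatMap pvPartChars).map pvMk1)

-- ===== PRECONDITION & SPEC =====
def Spec_expand_label (label : String) (out : List String) : Prop := out = expand_label_alt label
instance (label : String) (out : List String) : Decidable (Spec_expand_label label out) := by unfold Spec_expand_label; infer_instance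

-- ===== CLAIM (what is proved, stated in full; the proofs are below) =====
def Claim_equal_expand_label : Prop := ∀ (label : String), Dom_expand_label label → Spec_expand_label label (expand_label label)

-- ===== LEMMAS AND PROOFS =====

theorem pvEmptyUpdate (xs : List String) :
    PySem.Set.update PySem.Set.empty xs = PySem.Set.ofList xs := PySem.Set.update_nil_left xs

theorem pvRstrip_idem (s : List Char) :
    PySem.Chars.rstrip (PySem.Chars.rstrip s) = PySem.Chars.rstrip s := by
  simp [PySem.Chars.rstrip, List.dropWhile_idempotent]

theorem pvRstrip_prefix (s : List Char) : PySem.Chars.rstrip s <+: s := by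
  rw [PySem.Chars.rstrip]
  conv_rhs => rw [← List.reverse_reverse s]
  exact List.reverse_prefix.mpr (List.dropWhile_suffix _)

theorem pvLstrip_rstrip (s : List Char)
    (h : PySem.Chars.lstrip s = s) :
    PySem.Chars.lstrip (PySem.Chars.rstrip s) = PySem.Chars.rstrip s := by
  rw [PySem.Chars.lstrip] at h ⊢
  rw [List.dropWhile_eq_self_iff] at h ⊢
  intro hl
  have hpre := pvRstrip_prefix s
  have h0 : 0 < s.length := lt_of_lt_of_le hl hpre.length_le
  rw [hpre.getElem hl]
  exact h h0

theorem pvStrip_idem (s : List Char) :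
    PySem.Chars.strip (PySem.Chars.strip s) = PySem.Chars.strip s := by
  rw [PySem.Chars.strip, PySem.Chars.strip]
  rw [pvLstrip_rstrip (PySem.Chars.lstrip s) (by simp [PySem.Chars.lstrip, List.dropWhile_idempotent])]
  exact pvRstrip_idem _

theorem pvScanB_out (n : Nat) (buf out : List Char) (h : buf.length <= n) :
    pvScanB buf out = out ++ pvScanB buf [] := by
  induction n generalizing buf out with
  | zero =>
      have hb : buf = [] := List.eq_nil_of_length_eq_zero (Nat.le_zero.mp h)
      subst hb; simp [pvScanB]
  | succ n ih =>
      match buf with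
      | [] => simp [pvScanB]
      | [a] => simp [pvScanB]
      | [a, d] => simp [pvScanB]
      | a :: d :: b :: rest =>
          rw [pvScanB, pvScanB]
          by_cases hd : (d == '-') = true
          · rw [if_pos hd, if_pos hd,
              ih rest _ (by simp at h ⊢; omega),
              ih rest ([] ++ (PySem.List.pyRange ((a.toNat : Int)) ((b.toNat : Int) + 1) 1).map
                (fun k => Char.ofNat k.toNat)) (by simp at h ⊢; omega)]
            simp
          · rw [if_neg hd, if_neg hd,
              ih (d :: b :: rest) _ (by simp at h ⊢; omega),
              ih (d :: b :: rest) ([] ++ [a]) (by simp at h ⊢; omega)]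
            simp

theorem pvScanA_eq_scanB (n : Nat) (content : List Char) (i : Nat) (chars : PySem.Set String)
    (hn : content.length - i <= n) :
    pvScanA content i chars = PySem.Set.update chars ((pvScanB (content.drop i) []).map pvMk1) := by
  induction n generalizing i chars with
  | zero =>
      have : ¬ i < content.length := by omega
      rw [pvScanA, dif_neg this, List.drop_eq_nil_of_le (by omega)]
      simp [pvScanB, PySem.Set.update_nil]
  | succ n ih =>
      by_cases hi : i < content.length
      · rw [pvScanA, dif_pos hi]
        by_cases hc : i + 2 < content.length ∧ content.getD (i + 1) ' ' = '-'
        · obtain ⟨h2, hdash⟩ := hc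
          have h1 : i + 1 < content.length := by omega
          have hd1 : content[i+1] = '-' := by rw [← List.getD_eq_getElem content ' ' h1]; exact hdash
          have hcb : (decide (i + 2 < content.length) && (content.getD (i + 1) ' ' == '-')) = true := by
            rw [List.getD_eq_getElem content ' ' h1, hd1]; simp [h2]
          rw [if_pos hcb]
          have e0 : content.drop i = content[i] :: content.drop (i + 1) := List.drop_eq_getElem_cons hi
          have e1 : content.drop (i + 1) = content[i+1] :: content.drop (i + 2) := List.drop_eq_getElem_cons h1
          have e2 : content.drop (i + 2) = content[i+2] :: content.drop (i + 3) := List.drop_eq_getElem_cons h2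
          rw [ih (i + 3) _ (by omega), e0, e1, e2, hd1, pvScanB, if_pos (by simp)]
          rw [List.getD_eq_getElem content ' ' hi, List.getD_eq_getElem content ' ' h2]
          rw [pvScanB_out (content.drop (i + 3)).length (content.drop (i + 3))
            ([] ++ (PySem.List.pyRange ((content[i].toNat : Int)) ((content[i+2].toNat : Int) + 1) 1).map
              (fun k => Char.ofNat k.toNat)) (le_refl _)]
          simp [List.map_append, PySem.Set.update_append, List.map_map, Function.comp_def]
        · have hcb : ¬ (decide (i + 2 < content.length) && (content.getD (i + 1) ' ' == '-')) = true := by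
            intro hcontra
            simp only [Bool.and_eq_true, decide_eq_true_eq, beq_iff_eq] at hcontra
            exact hc hcontra
          rw [if_neg hcb]
          have e0 : content.drop i = content[i] :: content.drop (i + 1) := List.drop_eq_getElem_cons hi
          have hstep : pvScanB (content[i] :: content.drop (i + 1)) [] =
              content[i] :: pvScanB (content.drop (i + 1)) [] := by
            rcases hr : content.drop (i + 1) with _ | ⟨d, rest0⟩
            · simp [pvScanB]
            · rcases rest0 with _ | ⟨b, rest⟩
              · simp [pvScanB]
              · have hlen := List.length_drop (l := content) (i := i + 1)
                rw [hr] at hlen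
                have h1 : i + 1 < content.length := by simp at hlen; omega
                have h2 : i + 2 < content.length := by simp at hlen; omega
                have hdval : content[i+1] = d := by
                  have hdr := List.drop_eq_getElem_cons h1 (l := content)
                  rw [hr] at hdr
                  exact ((List.cons.injEq _ _ _ _).mp hdr.symm).1
                have hd : ¬ (d == '-') = true := by
                  intro hcontra
                  exact hc ⟨h2, by rw [List.getD_eq_getElem content ' ' h1, hdval]; simpa using hcontra⟩
                rw [pvScanB, if_neg hd,
                  pvScanB_out (d :: b :: rest).length _ _ (le_refl _)]
                simp
          rw [ih (i + 1) _ (by omega), e0, hstep, List.map_cons, PySem.Set.update_cons,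
            List.getD_eq_getElem content ' ' hi]
      · rw [pvScanA, dif_neg hi, List.drop_eq_nil_of_le (by omega)]
        simp [pvScanB, PySem.Set.update_nil]

theorem pvUpdate_ofList (s : PySem.Set String) (xs : List String) :
    PySem.Set.update s (PySem.Set.ofList xs) = PySem.Set.update s xs := by
  induction xs using List.reverseRecOn generalizing s with
  | nil => rfl
  | append_singleton xs x ih =>
      by_cases hx : x ∈ xs
      · rw [PySem.Set.ofList_append_singleton,
          PySem.Set.add_of_mem ((PySem.Set.mem_ofList xs x).mpr hx), ih,
          PySem.Set.update_append, PySem.Set.update_cons, PySem.Set.update_nil,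
          PySem.Set.add_of_mem ((PySem.Set.mem_update s xs x).mpr (Or.inr hx))]
      · rw [PySem.Set.ofList_append_singleton,
          PySem.Set.add_of_not_mem (fun hmem => hx ((PySem.Set.mem_ofList xs x).mp hmem)),
          PySem.Set.update_append, ih, PySem.Set.update_append]

-- A's per-part update equals updating with B's character list, for an already-stripped part
theorem pvSingle_eq (p : List Char) (hp : PySem.Chars.strip p = p) (s : PySem.Set String) :
    PySem.Set.update s (pvExpandSingle p) = PySem.Set.update s ((pvPartChars p).map pvMk1) := by
  rw [pvExpandSingle, pvPartChars, hp]
  by_cases hb : (PySem.Chars.startswith p ['['] && PySem.Chars.endswith p [']']) = true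
  · rw [if_pos hb, if_pos hb,
      pvScanA_eq_scanB (PySem.List.slice p (some 1) (some (-1))).length _ 0 _ (by omega)]
    rw [List.drop_zero, pvEmptyUpdate, pvUpdate_ofList]
  · rw [if_neg hb, if_neg hb, ← PySem.Set.update_map_eq_foldl_add,
      pvEmptyUpdate, pvUpdate_ofList]

theorem pvFold_eq (parts : List (List Char)) (hstr : ∀ p ∈ parts, PySem.Chars.strip p = p)
    (s : PySem.Set String) :
    parts.foldl (fun chars part => PySem.Set.update chars (pvExpandSingle part)) s =
      PySem.Set.update s ((parts.flatMap pvPartChars).map pvMk1) := by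
  induction parts generalizing s with
  | nil => simp [PySem.Set.update_nil]
  | cons p rest ih =>
      rw [List.foldl_cons, ih (fun q hq => hstr q (List.mem_cons_of_mem p hq)),
        pvSingle_eq p (hstr p List.mem_cons_self) s,
        List.flatMap_cons, List.map_append, PySem.Set.update_append]

-- ===== VERDICT (by name: the statement is the Claim_ definition above) =====
theorem expand_label_spec : Claim_equal_expand_label := by
  intro label _
  show expand_label label = expand_label_alt label
  rw [expand_label, expand_label_alt]
  have hparts :
      ((PySem.Chars.splitOn (PySem.Chars.stripChars label.toList ['"']) [',']).filter
          (fun p => decide (PySem.Chars.strip p ≠ []))).map PySem.Chars.strip =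
      ((PySem.Chars.splitOn (PySem.Chars.stripChars label.toList ['"']) [',']).map
          PySem.Chars.strip).filter (fun p => decide (p ≠ [])) := by
    rw [List.filter_map]; rfl
  rw [hparts]
  rw [pvFold_eq _ (by
    intro p hp
    rcases List.mem_filter.mp hp with ⟨hp', _⟩
    rcases List.mem_map.mp hp' with ⟨q, _, rfl⟩
    exact pvStrip_idem q)]
  rw [pvEmptyUpdate]
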